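-- pv_equiv track=rewrite | github.com/imjoseangel/100-days-of-code | python/200problems/conditionandloop/countdigitletter.py | countdigitletters
-- ===== SOURCE A (Python) =====
-- def countdigitletters(mytext):
--     letters = 0
--     digits = 0
--     for item in mytext:
--         if item.isalpha():
--             letters += 1
--         elif item.isdigit():
--             digits += 1
--     return letters, digits
-- ===== SOURCE B (Python) =====
-- def countdigitletters(mytext):
--     letters = sum(1 for c in mytext if c.isalpha())
--     digits = sum(1 for c in mytext if c.isdigit())
--     return letters, digits
-- ===== Notes on version B (the rewrite author's own statement) =====
-- stated objective: idiomatic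
-- what changed: Replaced the single accumulator loop with if/elif by two independent counting passes (sum over a filter for letters, another for digits), valid because isalpha and isdigit are mutually exclusive per character.
import Mathlib
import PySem

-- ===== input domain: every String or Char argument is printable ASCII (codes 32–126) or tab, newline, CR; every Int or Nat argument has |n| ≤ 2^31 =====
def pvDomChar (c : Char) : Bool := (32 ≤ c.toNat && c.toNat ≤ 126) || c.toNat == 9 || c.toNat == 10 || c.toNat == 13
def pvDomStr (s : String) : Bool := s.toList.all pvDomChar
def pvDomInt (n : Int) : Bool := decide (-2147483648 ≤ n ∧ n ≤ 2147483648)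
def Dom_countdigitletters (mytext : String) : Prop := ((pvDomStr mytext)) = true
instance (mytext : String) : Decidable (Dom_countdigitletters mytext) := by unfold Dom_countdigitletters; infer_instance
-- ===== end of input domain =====

-- B replaces A's single if/elif accumulator loop by two independent counting passes (one for letters, one for digits); objective: idiomatic, same cost.


-- ===== PORT A =====
def countdigitletters (mytext : String) : Int × Int :=
  mytext.toList.foldl
    (fun st item =>
      if PySem.Chars.isalpha item then (st.1 + 1, st.2)
      else if PySem.Chars.isdigit item then (st.1, st.2 + 1)
      else st)
    (0, 0)

-- ===== PORT B =====
def countdigitletters_alt (mytext : String) : Int × Int :=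
  ((mytext.toList.filter (fun c => PySem.Chars.isalpha c)).foldl (fun acc _ => acc + 1) 0,
   (mytext.toList.filter (fun c => PySem.Chars.isdigit c)).foldl (fun acc _ => acc + 1) 0)

-- ===== PRECONDITION & SPEC =====
def Spec_countdigitletters (mytext : String) (out : Int × Int) : Prop := out = countdigitletters_alt mytext
instance (mytext : String) (out : Int × Int) : Decidable (Spec_countdigitletters mytext out) := by unfold Spec_countdigitletters; infer_instance

-- ===== CLAIM (what is proved, stated in full; the proofs are below) =====
def Claim_equal_countdigitletters : Prop := ∀ (mytext : String), Dom_countdigitletters mytext → Spec_countdigitletters mytext (countdigitletters mytext)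

-- ===== LEMMAS AND PROOFS =====

-- ===== VERDICT (by name: the statement is the Claim_ definition above) =====
lemma len_foldl (l : List Char) (a : Int) :
    l.foldl (fun acc _ => acc + 1) a = a + l.length := by
  induction l generalizing a with
  | nil => simp
  | cons x xs ih => simp [List.foldl, ih]; ring

lemma loop_inv (l : List Char) (a b : Int) :
    l.foldl
      (fun st item =>
        if PySem.Chars.isalpha item then (st.1 + 1, st.2)
        else if PySem.Chars.isdigit item then (st.1, st.2 + 1)
        else st)
      (a, b)
    = (a + (l.filter (fun c => PySem.Chars.isalpha c)).length,
       b + (l.filter (fun c => PySem.Chars.isdigit c)).length) := by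
  induction l generalizing a b with
  | nil => simp
  | cons x xs ih =>
    by_cases ha : PySem.Chars.isalpha x
    · have hd : PySem.Chars.isdigit x = false := by
        revert ha; simp [PySem.Chars.isalpha, PySem.Chars.isupper, PySem.Chars.islower, PySem.Chars.isdigit, Char.le_def, UInt32.le_iff_toNat_le]; omega
      simp [List.foldl, ha, hd, ih]; ring
    · by_cases hd : PySem.Chars.isdigit x
      · simp [List.foldl, ha, hd, ih]; ring
      · simp [List.foldl, ha, hd, ih]

theorem countdigitletters_spec : Claim_equal_countdigitletters := by
  intro mytext _
  unfold Spec_countdigitletters countdigitletters countdigitletters_alt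
  rw [loop_inv, len_foldl, len_foldl]
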